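-- pv_equiv track=rewrite | github.com/n7tms/EverybodyCodes | 2025.6/q1.py | eni_algo
-- ===== SOURCE A (Python) =====
-- def eni_algo(n, e, m):
--     score = 1
--     remainders = list()
--     for _ in range(e):
--         score *= n
--         rem = score % m
--         remainders.insert(0,str(rem))
--
--     return "".join(remainders)
-- ===== SOURCE B (Python) =====
-- def eni_algo(n, e, m):
--     # Stateless: emit position i directly as pow(n, e-i, m) (builtin modular
--     # exponentiation), front-to-back -- no running score, no list reversal.
--     return "".join(str(pow(n, e - i, m)) for i in range(e))
-- ===== Notes on version B (the rewrite author's own statement) =====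
-- stated objective: faster
-- what changed: B replaces A's stateful loop (growing bignum power, quadratic insert(0,...)) with a stateless map: output position i is pow(n, e-i, m) via builtin modular exponentiation, emitted front-to-back.
import Mathlib
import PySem

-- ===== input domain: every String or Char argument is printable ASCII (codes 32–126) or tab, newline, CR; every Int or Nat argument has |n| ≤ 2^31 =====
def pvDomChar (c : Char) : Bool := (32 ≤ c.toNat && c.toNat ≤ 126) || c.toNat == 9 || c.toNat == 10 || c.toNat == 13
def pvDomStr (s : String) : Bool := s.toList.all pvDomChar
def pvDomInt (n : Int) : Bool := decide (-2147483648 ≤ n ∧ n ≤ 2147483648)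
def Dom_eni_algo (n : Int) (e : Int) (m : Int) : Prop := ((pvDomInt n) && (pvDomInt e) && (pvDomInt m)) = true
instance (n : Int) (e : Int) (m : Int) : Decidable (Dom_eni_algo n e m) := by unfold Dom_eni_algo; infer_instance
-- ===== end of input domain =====

-- B emits each output position directly as pow(n, e-i, m) (builtin modular exponentiation), stateless, instead of A's stateful bignum loop with insert(0,...) (measured faster).


-- ===== PORT A =====
def eni_algo (n : Int) (e : Int) (m : Int) : String :=
  let st := (PySem.List.pyRange 0 e 1).foldl
    (fun (p : Int × List String) _ =>
      let score := p.1 * n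
      let rem := PySem.Int.mod score m
      (score, PySem.Int.toStr rem :: p.2))
    (1, [])
  PySem.Str.join "" st.2

-- ===== PORT B =====
-- pow(n, k, m) with k ≥ 1 (always the case here) is n^k % m with Python's %;
-- ported as Int.mod of the power (exact for the nonnegative exponents used).
def eni_algo_alt (n : Int) (e : Int) (m : Int) : String :=
  PySem.Str.join ""
    ((PySem.List.pyRange 0 e 1).map
      (fun i => PySem.Int.toStr (PySem.Int.mod (n ^ (e - i).toNat) m)))

-- ===== PRECONDITION & SPEC =====
-- Pre_ excludes exactly the inputs where the Python programs raise
-- (A: ZeroDivisionError, B: ValueError from pow): m = 0 with e ≥ 1.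
def Pre_eni_algo (n : Int) (e : Int) (m : Int) : Prop := m ≠ 0 ∨ e ≤ 0
instance (n : Int) (e : Int) (m : Int) : Decidable (Pre_eni_algo n e m) := by unfold Pre_eni_algo; infer_instance
def pvWitness_eni_algo : Int × Int × Int := (2, 5, 7)

def Spec_eni_algo (n : Int) (e : Int) (m : Int) (out : String) : Prop := out = eni_algo_alt n e m
instance (n : Int) (e : Int) (m : Int) (out : String) : Decidable (Spec_eni_algo n e m out) := by unfold Spec_eni_algo; infer_instance

-- ===== CLAIM =====
def Claim_equal_eni_algo : Prop := ∀ (n : Int) (e : Int) (m : Int), Dom_eni_algo n e m → Pre_eni_algo n e m → Spec_eni_algo n e m (eni_algo n e m)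

-- ===== LEMMAS AND PROOFS =====

-- A's loop over any range of length t, fully characterised: the score is s·nᵗ and
-- the accumulated list holds, at position j, the residue of s·n^(t-j).
theorem foldA_char (n m : Int) (t : Nat) (s : Int) (xs : List String) :
    (List.range t).foldl
      (fun (p : Int × List String) _ =>
        (p.1 * n, PySem.Int.toStr (PySem.Int.mod (p.1 * n) m) :: p.2)) (s, xs)
    = (s * n ^ t,
       ((List.range t).map (fun j => PySem.Int.toStr (PySem.Int.mod (s * n ^ (t - j)) m))) ++ xs) := by
  induction t with
  | zero => simp
  | succ t ih =>
    conv_lhs => rw [List.range_succ]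
    rw [List.foldl_append, ih]
    simp only [List.foldl_cons, List.foldl_nil]
    rw [List.range_succ_eq_map]
    simp only [List.map_cons, List.map_map, Prod.mk.injEq]
    refine ⟨by ring, ?_⟩
    congr 1
    · simp only [Nat.sub_zero]
      congr 2
      ring
    · congr 1
      apply List.map_congr_left
      intro j hj
      simp only [Function.comp, Nat.succ_eq_add_one]
      congr 4
      omega
-- ===== VERDICT =====
theorem eni_algo_spec : Claim_equal_eni_algo := by
  intro n e m _ _
  show eni_algo n e m = eni_algo_alt n e m
  unfold eni_algo eni_algo_alt
  rw [PySem.List.pyRange_one]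
  simp only [sub_zero, zero_add, List.foldl_map, List.map_map]
  rw [foldA_char n m e.toNat 1 []]
  simp only [one_mul, List.append_nil]
  congr 1
  apply List.map_congr_left
  intro j hj
  simp only [Function.comp]
  congr 3
  have := List.mem_range.mp hj
  omega
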